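-- pv_equiv track=rewrite | github.com/shiv-mm/Coursera | pwcheck.py | sequence_penalty_digit
-- ===== SOURCE A (Python) =====
-- def sequence_penalty_digit(pw: str) -> int:
--     # Penalize ascending digit runs (123, 4567); cap -20
--     n = len(pw)
--     penalty = 0
--     i = 0
--     while i < n:
--         run = 1
--         j = i
--         while j + 1 < n:
--             c1 = pw[j]
--             c2 = pw[j + 1]
--             if c1.isdigit() and c2.isdigit() and (ord(c2) == ord(c1) + 1):
--                 run += 1
--                 j += 1
--             else:
--                 break
--         if run >= 3:
--             penalty += 5 + (run - 3) * 2
--             i = j + 1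
--         else:
--             i += 1
--     return min(20, penalty)
-- ===== SOURCE B (Python) =====
-- def sequence_penalty_digit(pw: str) -> int:
--     # One forward pass keeping the length of the current ascending-digit run.
--     penalty = 0
--     run = 1
--     for i in range(1, len(pw)):
--         if pw[i - 1].isdigit() and pw[i].isdigit() and ord(pw[i]) == ord(pw[i - 1]) + 1:
--             run += 1
--         else:
--             if run >= 3:
--                 penalty += 5 + (run - 3) * 2
--             run = 1
--     if run >= 3:
--         penalty += 5 + (run - 3) * 2
--     return min(20, penalty)
-- ===== Notes on version B (the rewrite author's own statement) =====
-- stated objective: simpler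
-- what changed: Replaced A's nested while loops with index jumping and rescanning by a single forward for-loop that maintains the current ascending-digit-run length in one accumulator and closes each run as it ends.
import Mathlib
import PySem

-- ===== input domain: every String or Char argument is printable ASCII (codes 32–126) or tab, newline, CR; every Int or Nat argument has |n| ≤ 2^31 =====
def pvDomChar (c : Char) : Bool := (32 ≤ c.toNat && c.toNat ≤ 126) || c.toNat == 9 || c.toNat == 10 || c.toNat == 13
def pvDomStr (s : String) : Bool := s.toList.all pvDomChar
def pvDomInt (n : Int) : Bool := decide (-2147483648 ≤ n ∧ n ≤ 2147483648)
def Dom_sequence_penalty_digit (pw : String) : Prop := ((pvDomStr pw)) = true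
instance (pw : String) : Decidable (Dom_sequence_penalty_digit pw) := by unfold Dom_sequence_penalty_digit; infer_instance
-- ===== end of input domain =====

-- B replaces A's nested while loops (inner rescanning / index jumping) with a single
-- forward loop keeping one run-length accumulator; objective: simpler.

-- ===== PORT A =====
-- the shared guard "pw[j].isdigit() and pw[j+1].isdigit() and ord(pw[j+1]) == ord(pw[j]) + 1"
-- (both sources contain this exact condition; indices are always in range where it is used)
def pvAsc (cs : List Char) (j : Int) : Bool :=
  let c1 := PySem.List.pyGetD cs j ' '
  let c2 := PySem.List.pyGetD cs (j + 1) ' '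
  PySem.Chars.isdigit c1 && PySem.Chars.isdigit c2 && decide (c2.toNat = c1.toNat + 1)

-- A's inner while loop, state (run, j); the Nat argument is fuel (a totality guard only:
-- the loop runs at most cs.length steps, and it is always called with that much fuel)
def pvInnerA (cs : List Char) : Nat → Int → Int → Int × Int
  | 0, run, j => (run, j)
  | fuel + 1, run, j =>
    if j + 1 < (cs.length : Int) then
      if pvAsc cs j then pvInnerA cs fuel (run + 1) (j + 1) else (run, j)
    else (run, j)

-- A's outer while loop; the Nat argument is again fuel (never exhausted when ≥ cs.length + 1)
def pvOuterA (cs : List Char) : Nat → Int → Int → Int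
  | 0, penalty, _ => penalty
  | fuel + 1, penalty, i =>
    if i < (cs.length : Int) then
      let rj := pvInnerA cs cs.length 1 i
      if 3 ≤ rj.1 then pvOuterA cs fuel (penalty + 5 + (rj.1 - 3) * 2) (rj.2 + 1)
      else pvOuterA cs fuel penalty (i + 1)
    else penalty

def sequence_penalty_digit (pw : String) : Int :=
  min 20 (pvOuterA pw.toList (pw.toList.length + 1) 0 0)

-- ===== PORT B =====
-- loop body: state (penalty, run), loop index i
def pvStepB (cs : List Char) (st : Int × Int) (i : Int) : Int × Int :=
  if pvAsc cs (i - 1) then (st.1, st.2 + 1)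
  else (if 3 ≤ st.2 then st.1 + 5 + (st.2 - 3) * 2 else st.1, 1)

def sequence_penalty_digit_alt (pw : String) : Int :=
  let cs := pw.toList
  let st := (PySem.List.pyRange 1 (cs.length : Int) 1).foldl (pvStepB cs) (0, 1)
  min 20 (if 3 ≤ st.2 then st.1 + 5 + (st.2 - 3) * 2 else st.1)

-- ===== PRECONDITION & SPEC =====
def Spec_sequence_penalty_digit (pw : String) (out : Int) : Prop := out = sequence_penalty_digit_alt pw
instance (pw : String) (out : Int) : Decidable (Spec_sequence_penalty_digit pw out) := by unfold Spec_sequence_penalty_digit; infer_instance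

-- ===== CLAIM (what is proved, stated in full; the proofs are below) =====
def Claim_equal_sequence_penalty_digit : Prop := ∀ (pw : String), Dom_sequence_penalty_digit pw → Spec_sequence_penalty_digit pw (sequence_penalty_digit pw)

-- ===== LEMMAS AND PROOFS =====

-- "close the current run": the penalty after B's else-branch / final flush
def pvClose (pen r : Int) : Int := if 3 ≤ r then pen + 5 + (r - 3) * 2 else pen

-- B's remaining computation from loop index k with state (pen, r)
def pvG (cs : List Char) (k pen r : Int) : Int :=
  let st := (PySem.List.pyRange k (cs.length : Int) 1).foldl (pvStepB cs) (pen, r)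
  pvClose st.1 st.2

theorem pvG_of_ge (cs : List Char) (k pen r : Int) (h : (cs.length : Int) ≤ k) :
    pvG cs k pen r = pvClose pen r := by
  unfold pvG
  rw [PySem.List.pyRange_one]
  have : ((cs.length : Int) - k).toNat = 0 := by omega
  simp [this]

theorem pvG_step (cs : List Char) (k pen r : Int) (h : k < (cs.length : Int)) :
    pvG cs k pen r =
      if pvAsc cs (k - 1) then pvG cs (k + 1) pen (r + 1)
      else pvG cs (k + 1) (pvClose pen r) 1 := by
  unfold pvG
  rw [PySem.List.pyRange_one_cons h]
  by_cases hA : pvAsc cs (k - 1) <;> simp [hA, List.foldl_cons, pvStepB, pvClose]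

theorem pvInnerA_snd_ge (cs : List Char) (f : Nat) :
    ∀ run j : Int, j ≤ (pvInnerA cs f run j).2 := by
  induction f with
  | zero => intro run j; simp [pvInnerA]
  | succ f ih =>
      intro run j
      by_cases h1 : j + 1 < (cs.length : Int)
      · by_cases h2 : pvAsc cs j
        · simp only [pvInnerA, h1, if_true, h2]
          have := ih (run + 1) (j + 1); omega
        · simp [pvInnerA, h1, h2]
      · simp [pvInnerA, h1]

theorem pvInnerA_run (cs : List Char) (f : Nat) :
    ∀ run j : Int, (pvInnerA cs f run j).1 = run + ((pvInnerA cs f run j).2 - j) := by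
  induction f with
  | zero => intro run j; simp [pvInnerA]
  | succ f ih =>
      intro run j
      by_cases h1 : j + 1 < (cs.length : Int)
      · by_cases h2 : pvAsc cs j
        · simp only [pvInnerA, h1, if_true, h2]
          have := ih (run + 1) (j + 1); omega
        · simp [pvInnerA, h1, h2]
      · simp [pvInnerA, h1]

theorem pvInnerA_stop (cs : List Char) (f : Nat) :
    ∀ run j : Int, (cs.length : Int) - j ≤ f →
      (pvInnerA cs f run j).2 + 1 < (cs.length : Int) →
      pvAsc cs (pvInnerA cs f run j).2 = false := by
  induction f with
  | zero => intro run j hf h; simp [pvInnerA] at h ⊢; omega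
  | succ f ih =>
      intro run j hf h
      by_cases h1 : j + 1 < (cs.length : Int)
      · by_cases h2 : pvAsc cs j
        · simp only [pvInnerA, h1, if_true, h2] at h ⊢
          exact ih (run + 1) (j + 1) (by omega) h
        · simp [pvInnerA, h1, h2]
      · simp [pvInnerA, h1] at h

theorem pvInnerA_G (cs : List Char) (f : Nat) :
    ∀ run j pen : Int, (cs.length : Int) - j ≤ f → j < (cs.length : Int) →
      pvG cs (j + 1) pen run =
        (if (pvInnerA cs f run j).2 + 1 < (cs.length : Int) then
          pvG cs ((pvInnerA cs f run j).2 + 2) (pvClose pen (pvInnerA cs f run j).1) 1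
        else pvClose pen (pvInnerA cs f run j).1) := by
  induction f with
  | zero => intro run j pen hf hj; omega
  | succ f ih =>
      intro run j pen hf hj
      by_cases h1 : j + 1 < (cs.length : Int)
      · by_cases h2 : pvAsc cs j
        · simp only [pvInnerA, h1, if_true, h2]
          rw [pvG_step cs (j + 1) pen run h1]
          simp only [add_sub_cancel_right, h2, if_true]
          have := ih (run + 1) (j + 1) pen (by omega) h1
          simpa [add_assoc] using this
        · simp only [pvInnerA, h1, if_true, h2, Bool.false_eq_true, if_false]
          rw [pvG_step cs (j + 1) pen run h1]
          simp only [add_sub_cancel_right, h2, Bool.false_eq_true, if_false]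
          rw [show j + 1 + 1 = j + 2 by ring]
      · simp only [pvInnerA, h1, if_false]
        rw [pvG_of_ge cs (j + 1) pen run (by omega)]

theorem pvOuterA_eq_G (cs : List Char) (f : Nat) :
    ∀ pen i : Int, 0 ≤ i → (cs.length : Int) - i ≤ f →
      pvOuterA cs f pen i = pvG cs (i + 1) pen 1 := by
  induction f with
  | zero =>
      intro pen i h0 hf
      rw [pvG_of_ge cs (i + 1) pen 1 (by omega)]
      simp [pvOuterA, pvClose]
  | succ f ih =>
      intro pen i h0 hf
      by_cases h : i < (cs.length : Int)
      · have hadq : (cs.length : Int) - i ≤ (cs.length : Nat) := by omega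
        have hge := pvInnerA_snd_ge cs cs.length 1 i
        have hrun := pvInnerA_run cs cs.length 1 i
        have hG := pvInnerA_G cs cs.length 1 i pen hadq h
        set rj := pvInnerA cs cs.length 1 i with hrj
        simp only [pvOuterA, h, if_true, ← hrj]
        by_cases h3 : 3 ≤ rj.1
        · -- run >= 3 branch
          have hcl : pvClose pen rj.1 = pen + 5 + (rj.1 - 3) * 2 := by
            simp [pvClose, h3]
          rw [if_pos h3]
          rw [ih (pen + 5 + (rj.1 - 3) * 2) (rj.2 + 1) (by omega) (by omega)]
          rw [hG, show rj.2 + 1 + 1 = rj.2 + 2 by ring]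
          by_cases hlt : rj.2 + 1 < (cs.length : Int)
          · simp only [hlt, if_true, hcl]
          · simp only [hlt, if_false, hcl]
            rw [pvG_of_ge cs (rj.2 + 2) _ 1 (by omega)]
            simp [pvClose]
        · -- run < 3 branch: run = 1 or run = 2
          have hcl : pvClose pen rj.1 = pen := by simp only [pvClose]; rw [if_neg h3]
          rw [if_neg h3]
          rw [ih pen (i + 1) (by omega) (by omega)]
          rw [hG, show i + 1 + 1 = i + 2 by ring]
          have hr12 : rj.2 = i ∨ rj.2 = i + 1 := by omega
          rcases hr12 with h1 | h2
          · -- run = 1, j' = i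
            rw [h1, hcl]
            by_cases hlt : i + 1 < (cs.length : Int)
            · simp only [hlt, if_true]
            · simp only [hlt, if_false]
              rw [pvG_of_ge cs (i + 2) pen 1 (by omega)]
              simp [pvClose]
          · -- run = 2, j' = i + 1
            rw [h2, hcl]
            by_cases hlt : i + 1 + 1 < (cs.length : Int)
            · simp only [hlt, if_true]
              have hstop := pvInnerA_stop cs cs.length 1 i hadq (by rw [← hrj, h2]; omega)
              rw [← hrj, h2] at hstop
              rw [pvG_step cs (i + 2) pen 1 (by omega)]
              rw [show i + 2 - 1 = i + 1 by ring]
              simp only [hstop, Bool.false_eq_true, if_false]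
              rw [show pvClose pen 1 = pen by simp [pvClose]]
              rw [show i + 1 + 2 = i + 2 + 1 by ring]
            · simp only [hlt, if_false]
              rw [pvG_of_ge cs (i + 2) pen 1 (by omega)]
              simp [pvClose]
      · simp only [pvOuterA, h, if_false]
        rw [pvG_of_ge cs (i + 1) pen 1 (by omega)]
        simp [pvClose]

-- ===== VERDICT (by name: the statement is the Claim_ definition above) =====
theorem sequence_penalty_digit_spec : Claim_equal_sequence_penalty_digit := by
  intro pw _
  unfold Spec_sequence_penalty_digit sequence_penalty_digit sequence_penalty_digit_alt
  rw [pvOuterA_eq_G pw.toList (pw.toList.length + 1) 0 0 le_rfl (by omega)]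
  unfold pvG pvClose
  norm_num
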